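-- pv_equiv track=rewrite | github.com/glomdom/hackerrank-solutions | username-changes.py | possibleChanges
-- ===== SOURCE A (Python) =====
-- def possibleChanges(usernames):
--     result = []
--
--     for user in usernames:
--         if len(user) < 1:
--             result.append("NO")
--
--         for i in range(len(user) - 1):
--             if user[i] > user[i + 1]:
--                 result.append("YES")
--
--                 break
--         else:
--             result.append("NO")
--
--     return result
-- ===== SOURCE B (Python) =====
-- def possibleChanges(usernames):
--     result = []
--     for user in usernames:
--         if len(user) < 1:
--             result.append("NO")
--         result.append("NO" if list(user) == sorted(user) else "YES")
--     return result
-- ===== Notes on version B (the rewrite author's own statement) =====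
-- stated objective: idiomatic
-- what changed: Replaced the inner break/else pairwise index scan with the sorted-comparison list(user) == sorted(user): a string has no descending adjacent pair exactly when it is already sorted.
import Mathlib
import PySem

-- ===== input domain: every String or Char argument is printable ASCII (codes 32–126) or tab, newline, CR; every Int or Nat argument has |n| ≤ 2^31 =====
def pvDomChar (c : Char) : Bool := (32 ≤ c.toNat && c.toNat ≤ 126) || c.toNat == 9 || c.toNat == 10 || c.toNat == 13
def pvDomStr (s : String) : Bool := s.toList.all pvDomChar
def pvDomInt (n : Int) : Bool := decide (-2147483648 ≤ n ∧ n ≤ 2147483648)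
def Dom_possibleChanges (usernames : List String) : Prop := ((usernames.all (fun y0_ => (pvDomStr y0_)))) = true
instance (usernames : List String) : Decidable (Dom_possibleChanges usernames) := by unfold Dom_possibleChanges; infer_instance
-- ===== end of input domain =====

-- B (idiomatic, same cost): replaces A's inner break/else pairwise index scan with the sorted-comparison list(user) == sorted(user).


-- ===== PORT A =====
-- inner for-i/break/else loop of A, recursing over the same adjacent pairs user[i] > user[i+1]
def pvScanA : List Char → String
  | c1 :: c2 :: rest => if c2 < c1 then "YES" else pvScanA (c2 :: rest)
  | _ => "NO"

def possibleChanges (usernames : List String) : List String :=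
  usernames.foldl (fun result user =>
    (if PySem.Str.len user < 1 then result ++ ["NO"] else result)
      ++ [pvScanA user.toList]) []

-- ===== PORT B =====
def possibleChanges_alt (usernames : List String) : List String :=
  usernames.foldl (fun result user =>
    (if PySem.Str.len user < 1 then result ++ ["NO"] else result)
      ++ [if user.toList = PySem.List.sorted user.toList (fun x => x) false then "NO" else "YES"]) []

-- ===== PRECONDITION & SPEC =====
def Spec_possibleChanges (usernames : List String) (out : List String) : Prop := out = possibleChanges_alt usernames
instance (usernames : List String) (out : List String) : Decidable (Spec_possibleChanges usernames out) := by unfold Spec_possibleChanges; infer_instance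

-- ===== CLAIM (what is proved, stated in full; the proofs are below) =====
def Claim_equal_possibleChanges : Prop := ∀ (usernames : List String), Dom_possibleChanges usernames → Spec_possibleChanges usernames (possibleChanges usernames)

-- ===== LEMMAS AND PROOFS =====

-- ===== VERDICT (by name: the statement is the Claim_ definition above) =====
theorem pvSorted_iff_chain (cs : List Char) :
    cs = PySem.List.sorted cs (fun x => x) false ↔ List.IsChain (· ≤ ·) cs := by
  constructor
  · intro h
    rw [List.isChain_iff_pairwise]
    have hp := PySem.List.sorted_pairwise cs (fun x => x)
    rw [← h] at hp
    exact hp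
  · intro h
    have hp : cs.Pairwise (· ≤ ·) := List.isChain_iff_pairwise.mp h
    exact (PySem.List.sorted_eq_self_of_pairwise cs (fun x => x) hp).symm

theorem pvScanA_chain (cs : List Char) :
    pvScanA cs = (if List.IsChain (· ≤ ·) cs then "NO" else "YES") := by
  induction cs with
  | nil => simp [pvScanA]
  | cons a t ih =>
    cases t with
    | nil => simp [pvScanA]
    | cons b r =>
      by_cases h : b < a
      · simp [pvScanA, h, List.isChain_cons_cons, not_le.mpr h]
      · have hab : a ≤ b := not_lt.mp h
        simp [pvScanA, h, List.isChain_cons_cons, hab, ih]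

theorem pvScanA_eq (cs : List Char) :
    pvScanA cs = (if cs = PySem.List.sorted cs (fun x => x) false then "NO" else "YES") := by
  rw [pvScanA_chain]
  by_cases h : List.IsChain (· ≤ ·) cs
  · rw [if_pos h, if_pos ((pvSorted_iff_chain cs).mpr h)]
  · rw [if_neg h, if_neg (fun hc => h ((pvSorted_iff_chain cs).mp hc))]

theorem possibleChanges_spec : Claim_equal_possibleChanges := by
  intro usernames _
  unfold Spec_possibleChanges possibleChanges possibleChanges_alt
  exact PySem.List.foldl_congr_mem usernames _ _ [] (fun acc user _ => by rw [pvScanA_eq])
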